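-- pv_equiv track=rewrite | github.com/wso2/choreo-samples | .azure/scripts/process_metadata.py | sort_samples
-- ===== SOURCE A (Python) =====
-- from collections import defaultdict
-- from itertools import cycle
--
-- def sort_samples(samples):
--     # Define the priority order for types, used for strict alternation
--     type_order = ["service", "web-application", "scheduled-task", "manual-task"]
--
--     # Separate and Organize QD samples and the rest
--     qd_samples_by_type = defaultdict(list)
--     rest_samples = []
--
--     for sample in samples:
--         if sample.get('imageVersion'):
--             sample_type = sample.get("componentType", "")
--             if sample_type in type_order:
--                 qd_samples_by_type[sample_type].append(sample)
--         else:
--             rest_samples.append(sample)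
--
--     # Interleave the QD samples based on type order
--     interleaved_qd_samples = []
--     type_cycle = cycle(type_order)
--     while any(qd_samples_by_type.values()):
--       current_type = next(type_cycle)
--       if qd_samples_by_type[current_type]:
--           interleaved_qd_samples.append(qd_samples_by_type[current_type].pop(0))
--
--     # Return the interleaved QD samples followed by the rest
--     return interleaved_qd_samples + rest_samples
-- ===== SOURCE B (Python) =====
-- def sort_samples(samples):
--     type_order = ["service", "web-application", "scheduled-task", "manual-task"]
--
--     def is_qd(sample):
--         return bool(sample.get('imageVersion'))
--
--     rest_samples = [s for s in samples if not is_qd(s)]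
--     buckets = [[s for s in samples
--                 if is_qd(s) and s.get("componentType", "") == t]
--                for t in type_order]
--
--     rounds = max(map(len, buckets), default=0)
--     interleaved = [b[i] for i in range(rounds) for b in buckets if i < len(b)]
--     return interleaved + rest_samples
-- ===== Notes on version B (the rewrite author's own statement) =====
-- stated objective: simpler
-- what changed: Replaces the defaultdict + cycle/pop(0) consuming loop by comprehensions: per-type filtered buckets read round by round at index i, with no mutation of intermediate state.
import Mathlib
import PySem

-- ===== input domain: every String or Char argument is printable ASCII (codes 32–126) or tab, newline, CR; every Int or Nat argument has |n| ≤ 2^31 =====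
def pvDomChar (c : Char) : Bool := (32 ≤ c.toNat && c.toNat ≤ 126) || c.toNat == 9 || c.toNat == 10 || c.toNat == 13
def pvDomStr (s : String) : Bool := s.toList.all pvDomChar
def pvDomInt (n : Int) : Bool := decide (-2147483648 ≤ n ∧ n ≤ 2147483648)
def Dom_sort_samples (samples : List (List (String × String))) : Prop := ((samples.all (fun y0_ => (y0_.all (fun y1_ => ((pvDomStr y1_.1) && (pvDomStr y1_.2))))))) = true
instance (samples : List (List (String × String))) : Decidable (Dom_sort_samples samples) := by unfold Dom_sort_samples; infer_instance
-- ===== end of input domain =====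

-- B replaces A's defaultdict + cycle/pop(0) consuming loop by per-type filtered buckets
-- indexed round by round (no mutation); objective: simpler.

-- ===== PORT A =====
-- sample.get(k): a sample is a Python dict, given here as an association list; dict(pairs) keeps
-- the LAST value of a duplicated key, which is exactly PySem.Dict.ofList.
def pyAttr (s : List (String × String)) (k : String) : Option String :=
  (PySem.Dict.ofList s).get? k

def typeOrderA : List String := ["service", "web-application", "scheduled-task", "manual-task"]

-- bool(sample.get('imageVersion')): truthy iff present and non-empty
def qdA (s : List (String × String)) : Bool := ((pyAttr s "imageVersion").getD "") != ""

-- the body of A's partition loop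
def partStepA (acc : PySem.Dict String (List (List (String × String))) × List (List (String × String)))
    (sample : List (String × String)) :
    PySem.Dict String (List (List (String × String))) × List (List (String × String)) :=
  if qdA sample then
    let stype := (pyAttr sample "componentType").getD ""
    if typeOrderA.contains stype then
      (acc.1.insert stype (acc.1.getD stype [] ++ [sample]), acc.2)
    else acc
  else (acc.1, acc.2 ++ [sample])

-- one step of the cycle loop at type t: pop the head of bucket t if non-empty
def roundStepA (acc : List (List (String × String)) × PySem.Dict String (List (List (String × String))))
    (t : String) :
    List (List (String × String)) × PySem.Dict String (List (List (String × String))) :=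
  match acc.2.getD t [] with
  | [] => acc
  | x :: xs => (acc.1 ++ [x], acc.2.insert t xs)

-- one full pass of the cycle over type_order (4 consecutive steps of A's while loop)
def roundA (qd : PySem.Dict String (List (List (String × String)))) :
    List (List (String × String)) × PySem.Dict String (List (List (String × String))) :=
  typeOrderA.foldl roundStepA ([], qd)

def sizeA (qd : PySem.Dict String (List (List (String × String)))) : Nat :=
  (typeOrderA.map (fun t => (qd.getD t []).length)).sum

-- behaviour of a pass of roundStepA over distinct keys (needed by drainA's termination proof)
theorem popRound_spec (keys : List String) (hnd : keys.Nodup)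
    (qd : PySem.Dict String (List (List (String × String)))) (out : List (List (String × String))) :
    (keys.foldl roundStepA (out, qd)).1
        = out ++ keys.filterMap (fun t => (qd.getD t []).head?)
    ∧ ∀ t, (keys.foldl roundStepA (out, qd)).2.getD t []
        = if t ∈ keys then (qd.getD t []).tail else qd.getD t [] := by
  induction keys generalizing qd out with
  | nil => simp
  | cons k ks ih =>
    rcases List.nodup_cons.mp hnd with ⟨hk, hnd'⟩
    simp only [List.foldl_cons]
    rcases h : qd.getD k [] with _ | ⟨x, xs⟩
    · have hstep : roundStepA (out, qd) k = (out, qd) := by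
        simp [roundStepA, h]
      rw [hstep]
      obtain ⟨ih1, ih2⟩ := ih hnd' qd out
      constructor
      · simp [ih1, h]
      · intro t
        rw [ih2 t]
        by_cases ht : t ∈ ks
        · simp [ht]
        · by_cases htk : t = k
          · subst htk; simp [ht, h]
          · simp [ht, htk]
    · have hstep : roundStepA (out, qd) k = (out ++ [x], qd.insert k xs) := by
        simp [roundStepA, h]
      rw [hstep]
      obtain ⟨ih1, ih2⟩ := ih hnd' (qd.insert k xs) (out ++ [x])
      constructor
      · rw [ih1, List.filterMap_cons]
        have : ks.filterMap (fun t => ((qd.insert k xs).getD t []).head?)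
            = ks.filterMap (fun t => (qd.getD t []).head?) := by
          apply List.filterMap_congr
          intro t ht
          rw [PySem.Dict.getD_insert_of_ne _ _ _ (by rintro rfl; exact hk ht)]
        rw [this, h]
        simp
      · intro t
        rw [ih2 t]
        by_cases ht : t ∈ ks
        · have htk : t ≠ k := by rintro rfl; exact hk ht
          simp [ht, PySem.Dict.getD_insert_of_ne _ _ _ htk]
        · by_cases htk : t = k
          · subst htk; simp [ht, h, PySem.Dict.getD_insert_self]
          · simp [ht, htk, PySem.Dict.getD_insert_of_ne _ _ _ htk]

-- A's while/cycle loop: grouped into full passes over type_order (types whose bucket is empty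
-- contribute nothing in a pass, so the appended elements are exactly those of A's per-step loop;
-- only type_order keys ever hold a non-empty list, so checking them is any(d.values())).
def drainA (qd : PySem.Dict String (List (List (String × String)))) :
    List (List (String × String)) :=
  if typeOrderA.all (fun t => (qd.getD t []).isEmpty) then []
  else (roundA qd).1 ++ drainA (roundA qd).2
termination_by sizeA qd
decreasing_by
  rename_i h
  have h2 := (popRound_spec typeOrderA (by decide) qd []).2
  simp only [sizeA, roundA, typeOrderA, List.all_cons, List.all_nil, Bool.and_eq_true,
    List.isEmpty_iff_length_eq_zero, List.map_cons, List.map_nil, List.sum_cons,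
    List.sum_nil] at h ⊢
  simp only [typeOrderA] at h2
  rw [h2 "service", h2 "web-application", h2 "scheduled-task", h2 "manual-task"]
  rw [if_pos (by decide), if_pos (by decide), if_pos (by decide), if_pos (by decide)]
  simp only [List.length_tail]
  generalize (qd.getD "service" []).length = a at h ⊢
  generalize (qd.getD "web-application" []).length = b at h ⊢
  generalize (qd.getD "scheduled-task" []).length = c at h ⊢
  generalize (qd.getD "manual-task" []).length = e at h ⊢
  simp only [and_true] at h
  omega

def sort_samples (samples : List (List (String × String))) : List (List (String × String)) :=
  let st := samples.foldl partStepA (PySem.Dict.empty, [])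
  drainA st.1 ++ st.2

-- ===== PORT B =====
def typeOrderB : List String := ["service", "web-application", "scheduled-task", "manual-task"]

def qdB (s : List (String × String)) : Bool := ((pyAttr s "imageVersion").getD "") != ""

def sort_samples_alt (samples : List (List (String × String))) : List (List (String × String)) :=
  let rest := samples.filter (fun s => !qdB s)
  let buckets := typeOrderB.map (fun t =>
    samples.filter (fun s => qdB s && ((pyAttr s "componentType").getD "" == t)))
  -- max(map(len, buckets), default=0)
  let rounds := (buckets.map List.length).foldl Nat.max 0
  ((List.range rounds).flatMap (fun i => buckets.filterMap (fun b => b[i]?))) ++ rest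

-- ===== PRECONDITION & SPEC =====
def Spec_sort_samples (samples : List (List (String × String))) (out : List (List (String × String))) : Prop := out = sort_samples_alt samples
instance (samples : List (List (String × String))) (out : List (List (String × String))) : Decidable (Spec_sort_samples samples out) := by unfold Spec_sort_samples; infer_instance

-- ===== CLAIM (what is proved, stated in full; the proofs are below) =====
def Claim_equal_sort_samples : Prop := ∀ (samples : List (List (String × String))), Dom_sort_samples samples → Spec_sort_samples samples (sort_samples samples)

-- ===== LEMMAS AND PROOFS =====

-- the interleaving of four fixed buckets, round by round (B's shape, specialised to 4 lists)
def inter4 (l1 l2 l3 l4 : List (List (String × String))) : List (List (String × String)) :=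
  (List.range (([l1, l2, l3, l4].map List.length).foldl Nat.max 0)).flatMap
    (fun i => [l1, l2, l3, l4].filterMap (fun b => b[i]?))

theorem inter4_nil : inter4 [] [] [] [] = [] := by decide

theorem inter4_cons (l1 l2 l3 l4 : List (List (String × String)))
    (h : ¬(l1 = [] ∧ l2 = [] ∧ l3 = [] ∧ l4 = [])) :
    inter4 l1 l2 l3 l4
      = [l1, l2, l3, l4].filterMap List.head? ++ inter4 l1.tail l2.tail l3.tail l4.tail := by
  have hlen : ¬(l1.length = 0 ∧ l2.length = 0 ∧ l3.length = 0 ∧ l4.length = 0) := by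
    simpa [List.length_eq_zero_iff] using h
  have hm : (([l1, l2, l3, l4].map List.length).foldl Nat.max 0)
      = (([l1.tail, l2.tail, l3.tail, l4.tail].map List.length).foldl Nat.max 0) + 1 := by
    simp only [List.map_cons, List.map_nil, List.foldl_cons, List.foldl_nil, List.length_tail]
    simp only [Nat.max_def]
    split_ifs <;> omega
  rw [inter4, inter4, hm, List.range_succ_eq_map, List.flatMap_cons, List.flatMap_map]
  congr 1
  · simp [← List.head?_eq_getElem?]
  · apply List.flatMap_congr
    intro i _
    simp only [Nat.succ_eq_add_one]
    show List.filterMap (fun x => x[i + 1]?) [l1, l2, l3, l4]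
        = List.filterMap (fun b => b[i]?) (List.map List.tail [l1, l2, l3, l4])
    rw [List.filterMap_map]
    exact List.filterMap_congr (fun b _ => (List.getElem?_tail).symm)

theorem part_snd (samples : List (List (String × String)))
    (d : PySem.Dict String (List (List (String × String)))) (r : List (List (String × String))) :
    (samples.foldl partStepA (d, r)).2 = r ++ samples.filter (fun s => !qdA s) := by
  induction samples generalizing d r with
  | nil => simp
  | cons s ss ih =>
    simp only [List.foldl_cons, List.filter_cons]
    by_cases hq : qdA s
    · set ts := (pyAttr s "componentType").getD "" with hts
      by_cases hc : ts ∈ typeOrderA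
      · have hstep : partStepA (d, r) s = (d.insert ts (d.getD ts [] ++ [s]), r) := by
          simp [partStepA, hq, ← hts, hc]
        rw [hstep, ih]
        simp [hq]
      · have hstep : partStepA (d, r) s = (d, r) := by
          simp [partStepA, hq, ← hts, hc]
        rw [hstep, ih]
        simp [hq]
    · have hstep : partStepA (d, r) s = (d, r ++ [s]) := by
        simp [partStepA, hq]
      rw [hstep, ih]
      simp [hq]

theorem part_fst (samples : List (List (String × String)))
    (d : PySem.Dict String (List (List (String × String)))) (r : List (List (String × String)))
    (t : String) (ht : t ∈ typeOrderA) :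
    (samples.foldl partStepA (d, r)).1.getD t []
      = d.getD t [] ++ samples.filter (fun s => qdA s && ((pyAttr s "componentType").getD "" == t)) := by
  induction samples generalizing d r with
  | nil => simp
  | cons s ss ih =>
    simp only [List.foldl_cons, List.filter_cons]
    by_cases hq : qdA s
    · set ts := (pyAttr s "componentType").getD "" with hts
      by_cases hc : ts ∈ typeOrderA
      · have hstep : partStepA (d, r) s
            = (d.insert ts (d.getD ts [] ++ [s]), r) := by
          simp [partStepA, hq, ← hts, hc]
        rw [hstep, ih]
        by_cases he : ts = t
        · subst he
          simp [hq, PySem.Dict.getD_insert_self]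
        · have : (qdA s && (ts == t)) = false := by simp [he]
          rw [this]
          simp only [PySem.Dict.getD_insert_of_ne _ _ _ (Ne.symm he)]
          simp
      · have hstep : partStepA (d, r) s = (d, r) := by
          simp [partStepA, hq, ← hts, hc]
        have hne : ts ≠ t := by
          rintro rfl
          exact hc ht
        have : (qdA s && (ts == t)) = false := by simp [hne]
        rw [hstep, ih, this]
        simp
    · have hstep : partStepA (d, r) s = (d, r ++ [s]) := by
        simp [partStepA, hq]
      simp [hstep, ih, hq]

theorem drain_eq_inter4 (qd : PySem.Dict String (List (List (String × String)))) :
    drainA qd = inter4 (qd.getD "service" []) (qd.getD "web-application" [])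
                       (qd.getD "scheduled-task" []) (qd.getD "manual-task" []) := by
  induction qd using drainA.induct with
  | case1 qd hall =>
    rw [drainA, if_pos hall]
    simp only [typeOrderA, List.all_cons, List.all_nil, Bool.and_eq_true,
      List.isEmpty_iff, and_true] at hall
    obtain ⟨e1, e2, e3, e4⟩ := hall
    rw [e1, e2, e3, e4, inter4_nil]
  | case2 qd hall ih =>
    rw [drainA, if_neg hall]
    have hne : ¬(qd.getD "service" [] = [] ∧ qd.getD "web-application" [] = []
        ∧ qd.getD "scheduled-task" [] = [] ∧ qd.getD "manual-task" [] = []) := by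
      simp only [typeOrderA, List.all_cons, List.all_nil, Bool.and_eq_true,
        List.isEmpty_iff, and_true] at hall
      tauto
    have hp := popRound_spec typeOrderA (by decide) qd []
    have e1 : (roundA qd).1 = List.filterMap List.head?
        [qd.getD "service" [], qd.getD "web-application" [],
         qd.getD "scheduled-task" [], qd.getD "manual-task" []] := by
      rw [show roundA qd = typeOrderA.foldl roundStepA ([], qd) from rfl, hp.1]
      rw [show ([qd.getD "service" [], qd.getD "web-application" [],
            qd.getD "scheduled-task" [], qd.getD "manual-task" []]
            : List (List (List (String × String))))
          = typeOrderA.map (fun t => qd.getD t []) from rfl, List.filterMap_map]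
      simp [Function.comp]
    have e2 : ∀ t, t ∈ typeOrderA → (roundA qd).2.getD t [] = (qd.getD t []).tail := by
      intro t ht
      rw [show roundA qd = typeOrderA.foldl roundStepA ([], qd) from rfl, hp.2 t, if_pos ht]
    rw [inter4_cons _ _ _ _ hne, e1, ih,
        e2 "service" (by decide), e2 "web-application" (by decide),
        e2 "scheduled-task" (by decide), e2 "manual-task" (by decide)]

-- ===== VERDICT (by name: the statement is the Claim_ definition above) =====
theorem sort_samples_spec : Claim_equal_sort_samples := by
  intro samples _
  unfold Spec_sort_samples
  show sort_samples samples = sort_samples_alt samples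
  simp only [sort_samples, sort_samples_alt]
  rw [drain_eq_inter4]
  rw [part_fst samples _ _ "service" (by decide),
      part_fst samples _ _ "web-application" (by decide),
      part_fst samples _ _ "scheduled-task" (by decide),
      part_fst samples _ _ "manual-task" (by decide),
      part_snd]
  simp only [PySem.Dict.getD_empty, List.nil_append]
  simp [inter4, typeOrderB, qdA, qdB]
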